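-- pv_equiv track=rewrite | github.com/druskus20/impossibleai | src/pytorch/utils.py | nn_batchs
-- ===== SOURCE A (Python) =====
-- from typing import Iterable, Sized, List, Set
--
-- def batch(iterable: Sized, n: int = 1) -> Iterable:
--     """
--     Given a iterable generate batches of size n
--     Input:
--      - Sized that will be batched
--      - n: Integer batch size
--     Output:
--     - Iterable
--     """
--     l: int = len(iterable)
--     for ndx in range(0, l, n):
--         yield iterable[ndx: min(ndx + n, l)]
--
-- def nn_batchs(X: Sized, y: Sized, n: int = 1, sequence_size: int = 5) -> Iterable:
--     """
--     Given the input examples and the golds generate batches of sequence_size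
--     Input:
--      - X: Sized input examples
--      - y: Sized golds
--      - n: Integer batch size
--      -sequence_size: Number of images in a training example. len(x) = len(y) * sequence_size
--     Output:
--     - Iterable
--     """
--
--     assert len(X) == len(y) * sequence_size, (
--         f"Inconsistent data, len(X) must equal len(y)*sequence_size."
--         f" len(X)={len(X)}, len(y)={len(y)}, sequence_size={sequence_size}"
--     )
--     bg_X: Iterable = batch(X, n * sequence_size)
--     bg_y: Iterable = batch(y, n)
--
--     for b_X, bg_y in zip(bg_X, bg_y):
--         yield b_X, bg_y
-- ===== SOURCE B (Python) =====
-- def nn_batchs(X, y, n=1, sequence_size=5):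
--     assert len(X) == len(y) * sequence_size, (
--         f"Inconsistent data, len(X) must equal len(y)*sequence_size."
--         f" len(X)={len(X)}, len(y)={len(y)}, sequence_size={sequence_size}"
--     )
--     # Stage 1: attach to each gold its sequence of inputs, consuming X once.
--     it = iter(X)
--     examples = [([next(it) for _ in range(sequence_size)], g) for g in y]
--     # Stage 2: group the examples n at a time and flatten each group.
--     for i in range(0, len(examples), n):
--         group = examples[i:i + n]
--         yield [v for seq, _ in group for v in seq], [g for _, g in group]
-- ===== Notes on version B (the rewrite author's own statement) =====
-- stated objective: alternative
-- what changed: B first materializes a list of (input-sequence, gold) example records by consuming X once with an iterator, then groups these records n at a time and flattens each group, instead of A's two parallel batch() generator streams over the flat arrays joined by zip.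
import Mathlib
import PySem

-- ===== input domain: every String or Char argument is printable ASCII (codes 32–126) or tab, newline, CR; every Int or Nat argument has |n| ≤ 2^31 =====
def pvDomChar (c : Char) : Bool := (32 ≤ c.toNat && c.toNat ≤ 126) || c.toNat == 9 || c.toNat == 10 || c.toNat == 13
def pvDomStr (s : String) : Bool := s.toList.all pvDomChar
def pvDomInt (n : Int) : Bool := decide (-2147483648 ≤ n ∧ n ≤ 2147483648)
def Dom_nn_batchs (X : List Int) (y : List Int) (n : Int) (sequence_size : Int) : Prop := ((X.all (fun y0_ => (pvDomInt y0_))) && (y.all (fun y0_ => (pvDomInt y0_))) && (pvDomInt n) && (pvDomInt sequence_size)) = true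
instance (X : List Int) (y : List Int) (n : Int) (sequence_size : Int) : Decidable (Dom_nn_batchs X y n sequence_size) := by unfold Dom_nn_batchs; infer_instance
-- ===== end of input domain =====

-- B replaces A's two parallel batch() generator streams zipped together by a staged pass:
-- it materializes (input-sequence, gold) example records, then groups them n at a time and
-- flattens each group. Return values only (both are generators in Python).

-- ===== PORT A =====
-- helper `batch(iterable, n)`: for ndx in range(0, l, n): yield iterable[ndx : min(ndx+n, l)]
def pvBatch (xs : List Int) (n : Int) : List (List Int) :=
  let l : Int := xs.length
  (PySem.List.pyRange 0 l n).map (fun ndx => PySem.List.slice xs (some ndx) (some (min (ndx + n) l)))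

-- A (after the assert, excluded by Pre_): zip(batch(X, n*sequence_size), batch(y, n)), yielding pairs
def nn_batchs (X : List Int) (y : List Int) (n : Int) (sequence_size : Int) : List (List Int × List Int) :=
  let bg_X := pvBatch X (n * sequence_size)
  let bg_y := pvBatch y n
  bg_X.zip bg_y

-- ===== PORT B =====
-- `examples = [([next(it) for _ in range(sequence_size)], g) for g in y]`: the iterator over X is
-- ported as an explicit remainder list carried through a fold; each gold takes sequence_size.toNat
-- elements off the front (range of a non-positive bound is empty; inside Pre_ the remainder is
-- always long enough, so `take` is exactly the successive next() calls).
def pvExamples (X : List Int) (y : List Int) (s : Int) : List (List Int × Int) :=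
  (y.foldl
    (fun (acc : List (List Int × Int) × List Int) g =>
      (acc.1 ++ [(acc.2.take s.toNat, g)], acc.2.drop s.toNat))
    (([] : List (List Int × Int)), X)).1

-- for i in range(0, len(examples), n): group = examples[i:i+n]; yield flatten(seqs), golds
def nn_batchs_alt (X : List Int) (y : List Int) (n : Int) (sequence_size : Int) : List (List Int × List Int) :=
  let examples := pvExamples X y sequence_size
  (PySem.List.pyRange 0 (examples.length : Int) n).map (fun i =>
    let group := PySem.List.slice examples (some i) (some (i + n))
    (group.flatMap Prod.fst, group.map Prod.snd))

-- ===== PRECONDITION & SPEC =====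
-- Pre_ excludes exactly the inputs where A raises: the assert (len(X) ≠ len(y)*sequence_size,
-- AssertionError) and a zero range step (n = 0 or sequence_size = 0, ValueError).
def Pre_nn_batchs (X : List Int) (y : List Int) (n : Int) (sequence_size : Int) : Prop :=
  (X.length : Int) = (y.length : Int) * sequence_size ∧ n ≠ 0 ∧ sequence_size ≠ 0
instance (X : List Int) (y : List Int) (n : Int) (sequence_size : Int) : Decidable (Pre_nn_batchs X y n sequence_size) := by unfold Pre_nn_batchs; infer_instance

def pvWitness_nn_batchs : List Int × List Int × Int × Int := ([1, 2, 3, 4, 5, 6], [7, 8, 9], 2, 2)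

def Spec_nn_batchs (X : List Int) (y : List Int) (n : Int) (sequence_size : Int) (out : List (List Int × List Int)) : Prop := out = nn_batchs_alt X y n sequence_size
instance (X : List Int) (y : List Int) (n : Int) (sequence_size : Int) (out : List (List Int × List Int)) : Decidable (Spec_nn_batchs X y n sequence_size out) := by unfold Spec_nn_batchs; infer_instance

-- ===== CLAIM =====
def Claim_equal_nn_batchs : Prop := ∀ (X : List Int) (y : List Int) (n : Int) (sequence_size : Int), Dom_nn_batchs X y n sequence_size → Pre_nn_batchs X y n sequence_size → Spec_nn_batchs X y n sequence_size (nn_batchs X y n sequence_size)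
-- ===== LEMMAS AND PROOFS =====

-- range(0, b, s) is empty for a negative step and 0 ≤ b
lemma pyRange_neg_step_nil (b s : Int) (hb : 0 ≤ b) (hs : s < 0) :
    PySem.List.pyRange 0 b s = [] := by
  unfold PySem.List.pyRange
  rw [if_neg (by omega), if_neg (by omega), if_neg (by omega)]
  simp

-- range(0, 0, s) is empty
lemma pyRange_zero_zero_nil (s : Int) : PySem.List.pyRange 0 0 s = [] := by
  unfold PySem.List.pyRange
  split_ifs with h1 h2 h3 <;> simp_all

-- Python's slice already clamps the stop at the length, so the explicit `min` is redundant
lemma slice_min_len (xs : List Int) (a b : Int) (hb : 0 ≤ b) :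
    PySem.List.slice xs (some a) (some (min b (xs.length : Int))) =
    PySem.List.slice xs (some a) (some b) := by
  simp only [PySem.List.slice, PySem.List.clampIdx]
  have h1 : ¬ (min b (xs.length : Int) < 0) := by omega
  have h2 : ¬ (b < 0) := by omega
  rw [if_neg h1, if_neg h2]
  congr 2
  omega

-- ceil(ly·s / (n·s)) = ceil(ly / n) for positive n, s and 0 ≤ ly
lemma ceil_scale (ly n s : Int) (_hly : 0 ≤ ly) (hn : 0 < n) (hs : 0 < s) :
    (ly * s + n * s - 1) / (n * s) = (ly + n - 1) / n := by
  set q := (ly + n - 1) / n with hq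
  have hns : 0 < n * s := by positivity
  have hub : ly + n - 1 < (q + 1) * n := Int.lt_ediv_add_one_mul_self (ly + n - 1) hn
  have hlb : q * n ≤ ly + n - 1 := Int.ediv_mul_le _ (by omega)
  have h1 : ly ≤ q * n := by nlinarith
  have h2 : (q - 1) * n < ly := by nlinarith
  have h1' : ly * s ≤ q * (n * s) := by nlinarith
  have h2' : (q - 1) * (n * s) < ly * s := by nlinarith
  have hge : q ≤ (ly * s + n * s - 1) / (n * s) := by
    rw [Int.le_ediv_iff_mul_le hns]; nlinarith
  have hlt : (ly * s + n * s - 1) / (n * s) < q + 1 := by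
    rw [Int.ediv_lt_iff_lt_mul hns]; nlinarith
  omega

-- the fold building `examples` appends, so the accumulator factors out
lemma pvExamples_fold (s : Int) (y : List Int) :
    ∀ (acc : List (List Int × Int)) (X : List Int),
    (y.foldl
      (fun (a : List (List Int × Int) × List Int) g =>
        (a.1 ++ [(a.2.take s.toNat, g)], a.2.drop s.toNat)) (acc, X)).1
    = acc ++ pvExamples X y s := by
  induction y with
  | nil => intro acc X; simp [pvExamples]
  | cons g ys ih =>
    intro acc X
    simp only [List.foldl_cons]
    rw [ih]
    conv_rhs => rw [pvExamples]
    simp only [List.foldl_cons]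
    rw [ih]
    simp [pvExamples]

lemma pvExamples_cons (X : List Int) (g : Int) (ys : List Int) (s : Int) :
    pvExamples X (g :: ys) s = (X.take s.toNat, g) :: pvExamples (X.drop s.toNat) ys s := by
  rw [pvExamples, List.foldl_cons, pvExamples_fold]
  simp

lemma length_pvExamples (X y : List Int) (s : Int) :
    (pvExamples X y s).length = y.length := by
  induction y generalizing X with
  | nil => simp [pvExamples]
  | cons g ys ih => rw [pvExamples_cons]; simp [ih]

-- dropping i examples drops i golds and i·t inputs
lemma pvExamples_drop (s : Int) (y : List Int) :
    ∀ (X : List Int) (i : Nat),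
    (pvExamples X y s).drop i = pvExamples (X.drop (i * s.toNat)) (y.drop i) s := by
  induction y with
  | nil => intro X i; simp [pvExamples]
  | cons g ys ih =>
    intro X i
    cases i with
    | zero => simp
    | succ j =>
      rw [pvExamples_cons]
      simp only [List.drop_succ_cons]
      rw [ih (X.drop s.toNat) j, List.drop_drop]
      congr 2
      ring

-- taking b examples: the inputs flatten to the first b·t of X, the golds are the first b of y
lemma pvExamples_take (s : Int) (y : List Int) :
    ∀ (X : List Int) (b : Nat), X.length = y.length * s.toNat →
    ((pvExamples X y s).take b).flatMap Prod.fst = X.take (b * s.toNat)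
    ∧ ((pvExamples X y s).take b).map Prod.snd = y.take b := by
  induction y with
  | nil =>
    intro X b hlen
    have hX : X = [] := List.eq_nil_of_length_eq_zero (by simpa using hlen)
    simp [pvExamples, hX]
  | cons g ys ih =>
    intro X b hlen
    cases b with
    | zero => simp
    | succ m =>
      rw [pvExamples_cons]
      simp only [List.take_succ_cons, List.flatMap_cons, List.map_cons]
      have hlen' : (X.drop s.toNat).length = ys.length * s.toNat := by
        simp [List.length_drop, hlen, Nat.succ_mul]
      obtain ⟨h1, h2⟩ := ih (X.drop s.toNat) m hlen'
      constructor
      · rw [h1, ← List.take_add]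
        congr 1
        ring
      · rw [h2]

-- main positive case
lemma main_pos (X y : List Int) (N S : Nat) (hN : 0 < N) (hS : 0 < S)
    (hlen : X.length = y.length * S) :
    nn_batchs X y (N : Int) (S : Int) = nn_batchs_alt X y (N : Int) (S : Int) := by
  have hns : (0 : Int) < (N : Int) * (S : Int) := by positivity
  have hn : (0 : Int) < (N : Int) := by exact_mod_cast hN
  have hly : (0:Int) ≤ (y.length : Int) := by exact_mod_cast Nat.zero_le _
  have hlenI : (X.length : Int) = (y.length : Int) * (S : Int) := by exact_mod_cast hlen
  simp only [nn_batchs, nn_batchs_alt, pvBatch, length_pvExamples]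
  rw [PySem.List.pyRange_of_pos _ _ hn, PySem.List.pyRange_of_pos _ _ hns]
  simp only [hlenI, List.map_map]
  have hcount : (if (0:Int) < (y.length : Int) * S then (((y.length : Int) * S - 0 + (N:Int) * S - 1) / ((N:Int) * S)).toNat else 0)
      = (if (0:Int) < (y.length : Int) then (((y.length : Int) - 0 + N - 1) / N).toNat else 0) := by
    by_cases hpos : (0:Int) < (y.length : Int)
    · have hSpos : (0:Int) < (S:Int) := by exact_mod_cast hS
      rw [if_pos (by nlinarith), if_pos hpos, sub_zero, sub_zero,
        ceil_scale (y.length : Int) N S hly hn hSpos]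
    · have hSpos : (0:Int) < (S:Int) := by exact_mod_cast hS
      rw [if_neg (by nlinarith), if_neg hpos]
  rw [hcount, List.zip_map']
  refine List.map_congr_left ?_
  intro k _
  have eX : (0:Int) + (N:Int) * (S:Int) * (k:Int) = ((N*S*k : Nat) : Int) := by push_cast; ring
  have eX2 : ((N*S*k : Nat) : Int) + (N:Int) * (S:Int) = ((N*S*k + N*S : Nat) : Int) := by push_cast; ring
  have eY : (0:Int) + (N:Int) * (k:Int) = ((N*k : Nat) : Int) := by push_cast; ring
  have eY2 : ((N*k : Nat) : Int) + (N:Int) = ((N*k + N : Nat) : Int) := by push_cast; ring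
  -- A's slices: drop the redundant min, then to drop/take form
  have hX := slice_min_len X ((0:Int) + (N:Int) * (S:Int) * (k:Int)) ((0:Int) + (N:Int) * (S:Int) * (k:Int) + (N:Int) * (S:Int)) (by positivity)
  rw [hlenI] at hX
  have hY := slice_min_len y ((0:Int) + (N:Int) * (k:Int)) ((0:Int) + (N:Int) * (k:Int) + (N:Int)) (by positivity)
  -- B's group
  have hlen' : (X.drop (N*k*S)).length = (y.drop (N*k)).length * ((S:Int)).toNat := by
    simp only [List.length_drop, Int.toNat_natCast, hlen, Nat.sub_mul]
  obtain ⟨hflat, hsnd⟩ := pvExamples_take (S:Int) (y.drop (N*k)) (X.drop (N*k*S)) N hlen'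
  have hdrop := pvExamples_drop (S:Int) y X (N*k)
  simp only [Int.toNat_natCast] at hdrop hflat
  simp only [Function.comp, Prod.mk.injEq]
  rw [hX, hY, eX, eX2, eY, eY2]
  simp only [PySem.List.slice_natCast]
  rw [show N*S*k + N*S - N*S*k = N*S from by omega,
      show N*k + N - N*k = N from by omega, hdrop, hflat, hsnd]
  exact ⟨by rw [show N*S*k = N*k*S from by ring], rfl⟩

-- ===== VERDICT =====
theorem nn_batchs_spec : Claim_equal_nn_batchs := by
  intro X y n s _ hpre
  obtain ⟨hlen, hn, hs⟩ := hpre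
  unfold Spec_nn_batchs
  have hly : (0:Int) ≤ (y.length : Int) := by exact_mod_cast Nat.zero_le _
  rcases lt_trichotomy n 0 with hn' | hn' | hn'
  · -- n < 0: range(0, len(y), n) is empty on both sides
    simp only [nn_batchs, nn_batchs_alt, pvBatch, length_pvExamples]
    rw [pyRange_neg_step_nil _ n hly hn']
    simp
  · exact absurd hn' hn
  · rcases lt_trichotomy s 0 with hs' | hs' | hs'
    · -- n > 0, s < 0: the length invariant forces X = [] and y = []
      have h0 : y.length = 0 := by
        rcases Nat.eq_zero_or_pos y.length with h | h
        · exact h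
        · exfalso
          have hp : (0:Int) < (y.length : Int) := by exact_mod_cast h
          have : (X.length : Int) < 0 := by rw [hlen]; nlinarith
          omega
      have hX : X.length = 0 := by
        have : (X.length : Int) = 0 := by rw [hlen, h0]; simp
        omega
      simp only [nn_batchs, nn_batchs_alt, pvBatch, length_pvExamples]
      rw [h0, hX]
      simp [pyRange_zero_zero_nil]
    · exact absurd hs' hs
    · obtain ⟨N, rfl⟩ : ∃ N : Nat, n = (N : Int) := ⟨n.toNat, (Int.toNat_of_nonneg hn'.le).symm⟩
      obtain ⟨S, rfl⟩ : ∃ S : Nat, s = (S : Int) := ⟨s.toNat, (Int.toNat_of_nonneg hs'.le).symm⟩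
      have hN : 0 < N := by exact_mod_cast hn'
      have hS : 0 < S := by exact_mod_cast hs'
      have hlenN : X.length = y.length * S := by exact_mod_cast hlen
      exact main_pos X y N S hN hS hlenN
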